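-- pv_equiv track=rewrite | github.com/horvi28/Programming_Challenges | CodeWarriors/2024/challenge2.py | task02
-- ===== SOURCE A (Python) =====
-- triplet_score = {
--     1: 1000,
--     6: 600,
--     5: 500,
--     4: 400,
--     3: 300,
--     2: 200
-- }
--
-- single_score = {
--     1: 100,
--     5: 50,
--     2: 0,
--     3: 0,
--     4: 0,
--     6: 0
-- }
--
-- def count_values(dices: list) -> dict:
--     counted_values = {}
--     for dice in dices:
--         if dice in counted_values:
--             counted_values[dice] += 1
--         else:
--             counted_values[dice] = 1
--     return counted_values
--
-- def task02(array):
--     score = 0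
--     counted_values = count_values(array)
--     for number in triplet_score.keys():
--         if number in array:
--             quantity = counted_values[number]
--             while quantity > 0:
--                 if quantity >= 3:
--                     score += triplet_score[number]
--                     quantity -= 3
--                 elif quantity >= 1:
--                     score += single_score[number]
--                     quantity -= 1
--     return score
-- ===== SOURCE B (Python) =====
-- TRIPLET = {1: 1000, 2: 200, 3: 300, 4: 400, 5: 500, 6: 600}
-- SINGLE = {1: 100, 5: 50}
--
-- def task02(array):
--     counts = {}
--     for dice in array:
--         counts[dice] = counts.get(dice, 0) + 1
--     return sum((c // 3) * TRIPLET.get(f, 0) + (c % 3) * SINGLE.get(f, 0)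
--                for f, c in counts.items())
-- ===== Notes on version B (the rewrite author's own statement) =====
-- stated objective: simpler
-- what changed: Replaces the six-key scan with membership tests and an inner decrement-by-3/1 while-loop by a single counting pass followed by a closed-form divmod decomposition (c//3 triplets, c%3 singles) summed over the counted faces.
import Mathlib
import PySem

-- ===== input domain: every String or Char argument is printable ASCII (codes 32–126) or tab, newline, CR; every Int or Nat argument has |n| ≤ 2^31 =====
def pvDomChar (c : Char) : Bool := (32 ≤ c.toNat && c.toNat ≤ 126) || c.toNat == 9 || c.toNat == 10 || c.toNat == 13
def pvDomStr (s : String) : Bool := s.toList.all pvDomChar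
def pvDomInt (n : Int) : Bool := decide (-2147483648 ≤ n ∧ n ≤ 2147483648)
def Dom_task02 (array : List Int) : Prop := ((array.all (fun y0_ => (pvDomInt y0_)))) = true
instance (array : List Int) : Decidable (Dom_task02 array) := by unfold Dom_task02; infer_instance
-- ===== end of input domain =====

-- B replaces A's six-key scan with membership tests and an inner decrement while-loop by one
-- counting pass plus a closed-form divmod decomposition per counted face (objective: simpler).

-- ===== PORT A =====
def tripletScoreDict : PySem.Dict Int Int :=
  PySem.Dict.ofList [(1, 1000), (6, 600), (5, 500), (4, 400), (3, 300), (2, 200)]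

def singleScoreDict : PySem.Dict Int Int :=
  PySem.Dict.ofList [(1, 100), (5, 50), (2, 0), (3, 0), (4, 0), (6, 0)]

def countValues (dices : List Int) : PySem.Dict Int Int :=
  dices.foldl
    (fun d dice => if d.contains dice then d.modify dice 0 (· + 1) else d.insert dice 1)
    PySem.Dict.empty

-- A's inner 'while quantity > 0' loop for a fixed face `number`; the Python 'elif quantity >= 1'
-- is always true when the loop guard holds (quantity > 0 on integers), so no third branch exists.
def whileQuantity (number : Int) (score : Int) (quantity : Int) : Int :=
  if quantity > 0 then
    if quantity ≥ 3 then
      whileQuantity number (score + tripletScoreDict.getD number 0) (quantity - 3)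
    else
      whileQuantity number (score + singleScoreDict.getD number 0) (quantity - 1)
  else score
termination_by quantity.toNat
decreasing_by all_goals omega

def task02 (array : List Int) : Int :=
  let counted := countValues array
  tripletScoreDict.keys.foldl
    (fun score number =>
      if array.contains number then
        whileQuantity number score (counted.getD number 0)
      else score)
    0

-- ===== PORT B =====
def tripletScoreB : PySem.Dict Int Int :=
  PySem.Dict.ofList [(1, 1000), (2, 200), (3, 300), (4, 400), (5, 500), (6, 600)]

def singleScoreB : PySem.Dict Int Int :=
  PySem.Dict.ofList [(1, 100), (5, 50)]

def task02_alt (array : List Int) : Int :=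
  let counts := array.foldl (fun d dice => d.insert dice (d.getD dice 0 + 1)) PySem.Dict.empty
  (counts.items.map (fun fc =>
      PySem.Int.floordiv fc.2 3 * tripletScoreB.getD fc.1 0
    + PySem.Int.mod fc.2 3 * singleScoreB.getD fc.1 0)).sum

-- ===== PRECONDITION & SPEC =====
def Spec_task02 (array : List Int) (out : Int) : Prop := out = task02_alt array
instance (array : List Int) (out : Int) : Decidable (Spec_task02 array out) := by unfold Spec_task02; infer_instance

-- ===== CLAIM (what is proved, stated in full; the proofs are below) =====
def Claim_equal_task02 : Prop := ∀ (array : List Int), Dom_task02 array → Spec_task02 array (task02 array)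

-- ===== LEMMAS AND PROOFS =====


-- A's counting loop builds exactly collections.Counter(array)
lemma countValues_eq_counter (array : List Int) :
    countValues array = PySem.Dict.counter array := by
  unfold countValues
  have hpt : ∀ (d : PySem.Dict Int Int) (k : Int), k ∈ array →
      (if d.contains k then d.modify k 0 (· + 1) else d.insert k 1)
        = d.insert k (d.getD k 0 + 1) := by
    intro d k _
    by_cases hc : d.contains k
    · simp [hc, PySem.Dict.modify]
    · simp [hc, PySem.Dict.getD_of_not_contains d 0 (by simpa using hc)]
  rw [PySem.List.foldl_congr_mem _ _ _ _ hpt]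
  exact PySem.Dict.foldl_insert_getD_add_one_eq_counter array

-- A's inner while-loop in closed form: c//3 triplets and c%3 singles
lemma whileQuantity_eq (n s q : Int) (h : 0 ≤ q) :
    whileQuantity n s q = s + q / 3 * tripletScoreDict.getD n 0
      + q % 3 * singleScoreDict.getD n 0 := by
  fun_induction whileQuantity n s q with
  | case1 s q h1 h2 ih =>
    rw [ih (by omega)]
    have e1 : (q - 3) / 3 = q / 3 - 1 := by omega
    have e2 : (q - 3) % 3 = q % 3 := by omega
    rw [e1, e2]; ring
  | case2 s q h1 h2 ih =>
    rw [ih (by omega)]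
    have e1 : (q - 1) / 3 = 0 := by omega
    have e2 : (q - 1) % 3 = q - 1 := by omega
    have e3 : q / 3 = 0 := by omega
    have e4 : q % 3 = q := by omega
    rw [e1, e2, e3, e4]; ring
  | case3 s q h1 =>
    have e3 : q / 3 = 0 := by omega
    have e4 : q % 3 = 0 := by omega
    rw [e3, e4]; ring

-- dropping zero terms of a mapped sum
lemma sum_map_filter_of_zero (l : List Int) (p : Int → Bool) (g : Int → Int)
    (h : ∀ x ∈ l, p x = false → g x = 0) : (l.map g).sum = ((l.filter p).map g).sum := by
  induction l with
  | nil => rfl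
  | cons a t ih =>
    by_cases hp : p a
    · simp [hp, ih (fun x hx => h x (List.mem_cons_of_mem a hx))]
    · simp only [Bool.not_eq_true] at hp
      simp [hp, h a (List.mem_cons_self) hp, ih (fun x hx => h x (List.mem_cons_of_mem a hx))]

-- B's per-face term vanishes on faces outside 1..6
lemma gB_zero (c x : Int) (hx : (1 ≤ x && x ≤ 6) = false) :
    c / 3 * tripletScoreB.getD x 0 + c % 3 * singleScoreB.getD x 0 = 0 := by
  have hxx : ¬(1 ≤ x ∧ x ≤ 6) := by simpa using hx
  have h1 : tripletScoreB.contains x = false := by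
    rw [PySem.Dict.contains_eq_decide_mem_keys,
      show tripletScoreB.keys = [1, 2, 3, 4, 5, 6] from by decide]
    simp only [decide_eq_false_iff_not, List.mem_cons, List.not_mem_nil, or_false]
    omega
  have h2 : singleScoreB.contains x = false := by
    rw [PySem.Dict.contains_eq_decide_mem_keys,
      show singleScoreB.keys = [1, 5] from by decide]
    simp only [decide_eq_false_iff_not, List.mem_cons, List.not_mem_nil, or_false]
    omega
  rw [PySem.Dict.getD_of_not_contains _ _ h1, PySem.Dict.getD_of_not_contains _ _ h2]
  ring

-- ===== VERDICT (by name: the statement is the Claim_ definition above) =====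
theorem task02_spec : Claim_equal_task02 := by
  intro array _
  show task02 array = task02_alt array
  unfold task02 task02_alt
  simp only [countValues_eq_counter,
    show tripletScoreDict.keys = [1, 6, 5, 4, 3, 2] from by decide,
    PySem.Dict.foldl_insert_getD_add_one_eq_counter, PySem.Dict.items_counter, List.map_map]
  set gB : Int → Int := fun f =>
    ((array.count f : Int)) / 3 * tripletScoreB.getD f 0
      + ((array.count f : Int)) % 3 * singleScoreB.getD f 0 with hgB
  -- right-hand side: floordiv/mod on nonnegative counts are / and %
  have hrhs : ((PySem.Set.ofList array).map
      ((fun fc : Int × Int => PySem.Int.floordiv fc.2 3 * tripletScoreB.getD fc.1 0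
          + PySem.Int.mod fc.2 3 * singleScoreB.getD fc.1 0)
        ∘ fun k => (k, (array.count k : Int)))).sum
      = ((PySem.Set.ofList array).map gB).sum := by
    refine congrArg _ (List.map_congr_left fun x _ => ?_)
    simp [Function.comp, hgB, PySem.Int.mod_eq_emod_of_pos]
  rw [hrhs]
  -- left-hand side: closed-form inner loop; the two score tables agree on faces 1..6
  have hpt : ∀ (score n : Int), n ∈ ([1, 6, 5, 4, 3, 2] : List Int) →
      (if array.contains n then
          whileQuantity n score ((PySem.Dict.counter array).getD n 0)
        else score)
      = (if array.contains n then score + gB n else score) := by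
    intro score n hn
    by_cases h : array.contains n
    · simp only [h, if_true]
      rw [PySem.Dict.getD_counter, whileQuantity_eq _ _ _ (Int.natCast_nonneg _), hgB]
      simp only [List.mem_cons, List.not_mem_nil, or_false] at hn
      rcases hn with rfl | rfl | rfl | rfl | rfl | rfl
      · simp only [show tripletScoreDict.getD 1 0 = 1000 from by decide,
          show singleScoreDict.getD 1 0 = 100 from by decide,
          show tripletScoreB.getD 1 0 = 1000 from by decide,
          show singleScoreB.getD 1 0 = 100 from by decide]; ring
      · simp only [show tripletScoreDict.getD 6 0 = 600 from by decide,
          show singleScoreDict.getD 6 0 = 0 from by decide,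
          show tripletScoreB.getD 6 0 = 600 from by decide,
          show singleScoreB.getD 6 0 = 0 from by decide]; ring
      · simp only [show tripletScoreDict.getD 5 0 = 500 from by decide,
          show singleScoreDict.getD 5 0 = 50 from by decide,
          show tripletScoreB.getD 5 0 = 500 from by decide,
          show singleScoreB.getD 5 0 = 50 from by decide]; ring
      · simp only [show tripletScoreDict.getD 4 0 = 400 from by decide,
          show singleScoreDict.getD 4 0 = 0 from by decide,
          show tripletScoreB.getD 4 0 = 400 from by decide,
          show singleScoreB.getD 4 0 = 0 from by decide]; ring
      · simp only [show tripletScoreDict.getD 3 0 = 300 from by decide,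
          show singleScoreDict.getD 3 0 = 0 from by decide,
          show tripletScoreB.getD 3 0 = 300 from by decide,
          show singleScoreB.getD 3 0 = 0 from by decide]; ring
      · simp only [show tripletScoreDict.getD 2 0 = 200 from by decide,
          show singleScoreDict.getD 2 0 = 0 from by decide,
          show tripletScoreB.getD 2 0 = 200 from by decide,
          show singleScoreB.getD 2 0 = 0 from by decide]; ring
    · have h' : n ∉ array := by simpa using h
      simp [h']
  rw [PySem.List.foldl_congr_mem _ _ _ _ hpt, PySem.List.foldl_if_eq_foldl_filter,
    PySem.List.foldl_add, zero_add]
  rw [sum_map_filter_of_zero (PySem.Set.ofList array) (fun f => 1 ≤ f && f ≤ 6) gB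
    (fun x _ hx => by simpa [hgB] using gB_zero ((array.count x : Int)) x hx)]
  refine (List.Perm.sum_eq (List.Perm.map gB ?_)).symm
  rw [List.perm_ext_iff_of_nodup (List.Nodup.filter _ (PySem.Set.nodup_ofList array))
    (List.Nodup.filter _ (by decide))]
  intro a
  simp only [List.mem_filter, PySem.Set.mem_ofList, List.contains_iff_mem,
    List.mem_cons, List.not_mem_nil, or_false]
  constructor
  · rintro ⟨h1, h2⟩
    refine ⟨by simp at h2; omega, h1⟩
  · rintro ⟨h1, h2⟩
    exact ⟨h2, by rcases h1 with h | h | h | h | h | h <;> simp [h]⟩
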